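-- pv_equiv track=rewrite | github.com/jnoortheen/arger | arger/parser/docstring.py | get_flags_from_param_doc
-- ===== SOURCE A (Python) =====
-- from typing import Any, Dict, List, NamedTuple, Optional, Pattern, Tuple
--
-- def get_flags_from_param_doc(doc: str, flag_symbol='-') -> Tuple[List[str], str]:
--     """Parse flags defined in param's doc
--
--     Examples:
--         ''':param arg1: -a --arg this is the document'''
--     """
--     doc_parts: List[str] = []
--     flags: List[str] = []
--     for part in doc.split():
--         if part.startswith(flag_symbol) and not doc_parts:
--             # strip both comma and empty space
--             flags.append(part.strip(", ").strip())
--         else: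
--             doc_parts.append(part)
--     return flags, " ".join(doc_parts)
-- ===== SOURCE B (Python) =====
-- from typing import List, Tuple
--
--
-- def get_flags_from_param_doc(doc: str, flag_symbol='-') -> Tuple[List[str], str]:
--     parts = doc.split()
--     b = len(parts)
--     # reverse scan: b ends as the index of the FIRST word not starting with
--     # flag_symbol (or len(parts) if every word is a flag) -- the partition point
--     for i, p in reversed(list(enumerate(parts))):
--         if not p.startswith(flag_symbol):
--             b = i
--     flags = [p.strip(", ").strip() for p in parts[:b]]
--     return flags, " ".join(parts[b:])
-- ===== Notes on version B (the rewrite author's own statement) =====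
-- stated objective: alternative
-- what changed: Instead of A's forward loop that threads a boolean-like state (whether a doc word has appeared) through two accumulating branches, B scans the enumerated words in REVERSE to compute the partition index (the first non-flag word's position), then builds the result by slicing the word list at that index.
import Mathlib
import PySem

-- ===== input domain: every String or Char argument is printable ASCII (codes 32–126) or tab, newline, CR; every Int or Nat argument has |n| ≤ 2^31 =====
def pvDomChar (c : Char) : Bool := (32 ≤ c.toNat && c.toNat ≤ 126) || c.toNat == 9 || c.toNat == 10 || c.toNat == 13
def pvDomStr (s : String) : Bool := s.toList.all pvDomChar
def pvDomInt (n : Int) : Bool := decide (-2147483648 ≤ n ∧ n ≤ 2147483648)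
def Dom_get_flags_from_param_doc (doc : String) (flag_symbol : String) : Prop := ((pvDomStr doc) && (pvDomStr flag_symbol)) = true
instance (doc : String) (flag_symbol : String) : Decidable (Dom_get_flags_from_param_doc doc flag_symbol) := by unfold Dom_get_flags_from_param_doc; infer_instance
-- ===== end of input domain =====

-- B replaces A's forward loop (which threads a state recording whether any non-flag word has appeared through two accumulating
-- branches) with a reverse scan over the enumerated words that computes the partition index,
-- followed by two slices; objective: alternative.


-- ===== PORT A =====
-- loop state: (flags, doc_parts)
def get_flags_from_param_doc (doc : String) (flag_symbol : String) : List String × String :=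
  let r := (PySem.Str.split₀ doc).foldl
    (fun (s : List String × List String) part =>
      if PySem.Str.startswith part flag_symbol && s.2.isEmpty then
        (s.1 ++ [PySem.Str.strip (PySem.Str.stripChars part ", ")], s.2)
      else
        (s.1, s.2 ++ [part]))
    ([], [])
  (r.1, PySem.Str.join " " r.2)

-- ===== PORT B =====
-- reverse scan over reversed(list(enumerate(parts))) computing the partition index b,
-- then two slices parts[:b] / parts[b:]
def get_flags_from_param_doc_alt (doc : String) (flag_symbol : String) : List String × String :=
  let parts := PySem.Str.split₀ doc
  let b := ((PySem.List.enumerate parts 0).reverse).foldl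
    (fun (b : Int) ip => if ¬ (PySem.Str.startswith ip.2 flag_symbol) then ip.1 else b)
    (parts.length : Int)
  let flags := (PySem.List.slice parts none (some b)).map
    (fun p => PySem.Str.strip (PySem.Str.stripChars p ", "))
  (flags, PySem.Str.join " " (PySem.List.slice parts (some b) none))

-- ===== PRECONDITION & SPEC =====
def Spec_get_flags_from_param_doc (doc : String) (flag_symbol : String) (out : List String × String) : Prop := out = get_flags_from_param_doc_alt doc flag_symbol
instance (doc : String) (flag_symbol : String) (out : List String × String) : Decidable (Spec_get_flags_from_param_doc doc flag_symbol out) := by unfold Spec_get_flags_from_param_doc; infer_instance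

-- ===== CLAIM (what is proved, stated in full; the proofs are below) =====
def Claim_equal_get_flags_from_param_doc : Prop := ∀ (doc : String) (flag_symbol : String), Dom_get_flags_from_param_doc doc flag_symbol → Spec_get_flags_from_param_doc doc flag_symbol (get_flags_from_param_doc doc flag_symbol)

-- ===== LEMMAS AND PROOFS =====

-- A's loop: once doc_parts is nonempty it only appends to it
theorem pvFoldl_nonempty (fs : String) (l : List String) (fl dp : List String) (h : dp ≠ []) :
    l.foldl
      (fun (s : List String × List String) part =>
        if PySem.Str.startswith part fs && s.2.isEmpty then
          (s.1 ++ [PySem.Str.strip (PySem.Str.stripChars part ", ")], s.2)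
        else
          (s.1, s.2 ++ [part]))
      (fl, dp) = (fl, dp ++ l) := by
  induction l generalizing dp with
  | nil => simp
  | cons a l ih =>
    have hdp : dp.isEmpty = false := by simpa [List.isEmpty_iff] using h
    simp only [List.foldl_cons, hdp, Bool.and_false, Bool.false_eq_true, if_false]
    rw [ih (dp ++ [a]) (by simp)]
    simp

-- A's loop with doc_parts empty splits at the first non-flag word
theorem pvFoldl_empty (fs : String) (l : List String) (fl : List String) :
    l.foldl
      (fun (s : List String × List String) part =>
        if PySem.Str.startswith part fs && s.2.isEmpty then
          (s.1 ++ [PySem.Str.strip (PySem.Str.stripChars part ", ")], s.2)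
        else
          (s.1, s.2 ++ [part]))
      (fl, []) =
    (fl ++ (l.takeWhile (fun p => PySem.Str.startswith p fs)).map
        (fun p => PySem.Str.strip (PySem.Str.stripChars p ", ")),
     l.dropWhile (fun p => PySem.Str.startswith p fs)) := by
  induction l generalizing fl with
  | nil => simp
  | cons a l ih =>
    by_cases hq : PySem.Str.startswith a fs = true
    · simp only [List.foldl_cons, hq, Bool.true_and, List.isEmpty_nil, if_true]
      rw [ih]
      have hq2 : PySem.Chars.startswith a.toList fs.toList = true := by simpa using hq
      simp [hq2]
    · have hq' : PySem.Str.startswith a fs = false := by simpa using hq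
      simp only [List.foldl_cons, hq', Bool.false_and, Bool.false_eq_true, if_false,
        List.nil_append]
      rw [pvFoldl_nonempty fs l fl [a] (by simp)]
      have hq2 : PySem.Chars.startswith a.toList fs.toList = false := by simpa using hq'
      simp [hq2]

-- B's reverse scan as a foldr over the enumeration: it computes the takeWhile boundary
theorem pvFoldr_enum {α : Type} (q : α → Bool) (l : List α) (s : Int) :
    List.foldr (fun (ip : Int × α) (b : Int) => if ¬ q ip.2 then ip.1 else b)
      (s + (l.length : Int)) (PySem.List.enumerate l s)
      = s + ((l.takeWhile q).length : Int) := by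
  induction l generalizing s with
  | nil => simp [PySem.List.enumerate_nil]
  | cons a l ih =>
    rw [PySem.List.enumerate_cons]
    by_cases hq : q a = true
    · have : s + ((a :: l).length : Int) = (s + 1) + (l.length : Int) := by
        simp; ring
      rw [List.foldr_cons, this, ih (s + 1)]
      simp [hq]
      ring
    · have hq' : q a = false := by simpa using hq
      simp [hq']

theorem pvDrop_takeWhile_len {α : Type} (q : α → Bool) (l : List α) :
    l.drop (l.takeWhile q).length = l.dropWhile q := by
  induction l with
  | nil => rfl
  | cons a l ih =>
    by_cases hq : q a = true
    · simp [hq, ih]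
    · have hq' : q a = false := by simpa using hq
      simp [hq']

theorem pvTake_takeWhile_len {α : Type} (q : α → Bool) (l : List α) :
    l.take (l.takeWhile q).length = l.takeWhile q := by
  induction l with
  | nil => rfl
  | cons a l ih =>
    by_cases hq : q a = true
    · simp [hq, ih]
    · have hq' : q a = false := by simpa using hq
      simp [hq']

-- ===== VERDICT (by name: the statement is the Claim_ definition above) =====
theorem get_flags_from_param_doc_spec : Claim_equal_get_flags_from_param_doc := by
  intro doc fs _
  unfold Spec_get_flags_from_param_doc get_flags_from_param_doc get_flags_from_param_doc_alt
  set q : String → Bool := fun p => PySem.Str.startswith p fs with hqdef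
  have hb : ((PySem.List.enumerate (PySem.Str.split₀ doc) 0).reverse).foldl
      (fun (b : Int) ip => if ¬ (PySem.Str.startswith ip.2 fs) then ip.1 else b)
      (((PySem.Str.split₀ doc).length : Nat) : Int)
      = ((((PySem.Str.split₀ doc).takeWhile q).length : Nat) : Int) := by
    rw [List.foldl_reverse]
    have := pvFoldr_enum q (PySem.Str.split₀ doc) 0
    simpa using this
  simp only [hb, PySem.List.slice_to_natCast, PySem.List.slice_from_natCast,
    pvTake_takeWhile_len, pvDrop_takeWhile_len, pvFoldl_empty]
  simp [hqdef]
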